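-- pv_equiv track=rewrite | github.com/somyadidwania/DMPAlab | Apriori Algorithm/Apriori Algo/Apriori.py | support_count
-- ===== SOURCE A (Python) =====
-- def support_count(data,C_old):
-- 	cnt = 0
-- 	C_new = {}
-- 	for i in data:
-- 		for itemset in C_old:
-- 			if set(itemset).issubset(i):
-- 				C_new[itemset] = C_new.get(itemset,0)+1
-- 	C_new = dict(sorted(C_new.items()))
-- 	return C_new
-- ===== SOURCE B (Python) =====
-- def support_count(data, C_old):
--     # Inverted index: for each item, the set of transaction indices containing it.
--     posting = {}
--     for idx, t in enumerate(data):
--         for item in t: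
--             posting.setdefault(item, set()).add(idx)
--     C_new = {}
--     for itemset in C_old:
--         common = None
--         for item in itemset:
--             p = posting.get(item, set())
--             common = p if common is None else common & p
--         cnt = len(data) if common is None else len(common)
--         if cnt:
--             C_new[itemset] = C_new.get(itemset, 0) + cnt
--     return dict(sorted(C_new.items()))
-- ===== Notes on version B (the rewrite author's own statement) =====
-- stated objective: faster
-- what changed: Replaces the transaction-major nested subset scan with an inverted index (item -> set of transaction indices) built in one pass; each candidate's support is the size of the intersection of its items' posting sets, inserted only when positive.
import Mathlib
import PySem

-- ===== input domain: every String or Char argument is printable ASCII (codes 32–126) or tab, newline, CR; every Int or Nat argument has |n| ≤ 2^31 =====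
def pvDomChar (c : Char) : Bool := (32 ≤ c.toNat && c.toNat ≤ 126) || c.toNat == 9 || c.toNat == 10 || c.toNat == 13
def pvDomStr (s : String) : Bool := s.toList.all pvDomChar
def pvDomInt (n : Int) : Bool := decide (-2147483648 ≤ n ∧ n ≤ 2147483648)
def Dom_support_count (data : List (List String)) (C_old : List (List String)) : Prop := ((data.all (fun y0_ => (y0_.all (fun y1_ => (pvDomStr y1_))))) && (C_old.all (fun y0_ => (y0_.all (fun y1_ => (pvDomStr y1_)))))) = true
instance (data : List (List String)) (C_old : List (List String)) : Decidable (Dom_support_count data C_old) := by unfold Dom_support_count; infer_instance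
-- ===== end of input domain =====

-- B replaces A's transaction-major nested subset scan by an inverted index (item → posting set
-- of transaction indices); each candidate's support is the size of the intersection of its
-- items' posting sets (alternative decomposition; equal return value proved below).

-- lexicographic (code-point) order on lists of strings: Python's ordering on tuples of str
abbrev pvOrd : LinearOrder (List String) := inferInstance

-- dict(sorted(d.items())): sort key-value pairs as Python sorts tuples (key first, then value)
def pvSortItems (xs : List (List String × Int)) : List (List String × Int) :=
  @PySem.List.sorted2 (List String × Int) (List String) Int pvOrd.toLT pvOrd.toDecidableLT
    Int.instLTInt Int.decLt xs (fun p => p.1) (fun p => p.2) false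

-- ===== PORT A =====
def support_count (data : List (List String)) (C_old : List (List String)) : List (List String × Int) :=
  let cNew : PySem.Dict (List String) Int :=
    data.foldl
      (fun acc i =>
        C_old.foldl
          (fun acc2 itemset =>
            if PySem.Set.issubset (PySem.Set.ofList itemset) i then
              acc2.insert itemset (acc2.getD itemset 0 + 1)
            else acc2)
          acc)
      PySem.Dict.empty
  pvSortItems cNew.items

-- ===== PORT B =====
-- posting[item] = set of transaction indices containing item (Source B's first loop)
def pvPosting (data : List (List String)) : PySem.Dict String (List Int) :=
  (PySem.List.enumerate data).foldl
    (fun d p =>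
      p.2.foldl (fun d2 item => d2.modify item [] (fun s => PySem.Set.add s p.1)) d)
    PySem.Dict.empty

-- running intersection of the posting sets of an itemset's items (Source B's inner loop)
def pvCommon (posting : PySem.Dict String (List Int)) (itemset : List String) : Option (List Int) :=
  itemset.foldl
    (fun c item =>
      let p := posting.getD item []
      match c with
      | none => some p
      | some cs => some (PySem.Set.inter cs p))
    none

def support_count_alt (data : List (List String)) (C_old : List (List String)) : List (List String × Int) :=
  let posting := pvPosting data
  let cNew : PySem.Dict (List String) Int :=
    C_old.foldl
      (fun acc itemset =>
        let cnt : Int :=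
          match pvCommon posting itemset with
          | none => (data.length : Int)
          | some cs => (cs.length : Int)
        if cnt ≠ 0 then acc.insert itemset (acc.getD itemset 0 + cnt) else acc)
      PySem.Dict.empty
  pvSortItems cNew.items

-- ===== PRECONDITION & SPEC =====
def Spec_support_count (data : List (List String)) (C_old : List (List String)) (out : List (List String × Int)) : Prop := out = support_count_alt data C_old
instance (data : List (List String)) (C_old : List (List String)) (out : List (List String × Int)) : Decidable (Spec_support_count data C_old out) := by unfold Spec_support_count; infer_instance

-- ===== CLAIM (what is proved, stated in full; the proofs are below) =====
def Claim_equal_support_count : Prop := ∀ (data : List (List String)) (C_old : List (List String)), Dom_support_count data C_old → Spec_support_count data C_old (support_count data C_old)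

-- ===== LEMMAS AND PROOFS =====

-- the Boolean subset test A performs
def pvSub (s t : List String) : Bool := PySem.Set.issubset (PySem.Set.ofList s) t

-- support of an itemset
def pvN (data : List (List String)) (s : List String) : Nat := data.countP (fun t => pvSub s t)

-- the candidate count B computes for an itemset
def pvCnt (data : List (List String)) (s : List String) : Int :=
  match pvCommon (pvPosting data) s with
  | none => (data.length : Int)
  | some cs => (cs.length : Int)

-- the value both dicts associate to key s
def pvV (data C_old : List (List String)) (s : List String) : Int :=
  (C_old.count s : Int) * (pvN data s : Int)

-- the dict A builds / the dict B builds
def pvDictA (data C_old : List (List String)) : PySem.Dict (List String) Int :=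
  data.foldl
    (fun acc i =>
      C_old.foldl
        (fun acc2 itemset =>
          if PySem.Set.issubset (PySem.Set.ofList itemset) i then
            acc2.insert itemset (acc2.getD itemset 0 + 1)
          else acc2)
        acc)
    PySem.Dict.empty

def pvDictB (data C_old : List (List String)) : PySem.Dict (List String) Int :=
  C_old.foldl
    (fun acc s => if pvCnt data s ≠ 0 then acc.insert s (acc.getD s 0 + pvCnt data s) else acc)
    PySem.Dict.empty

lemma pvSub_eq_all (s t : List String) : pvSub s t = s.all (fun x => t.contains x) := by
  rw [Bool.eq_iff_iff]
  simp [pvSub, PySem.Set.issubset, List.all_eq_true, PySem.Set.mem_ofList]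

-- generic "d[x] = d.get(x,0) + g x" loop
lemma getD_foldl_insert_add (l : List (List String)) (g : List String → Int)
    (d : PySem.Dict (List String) Int) (v : List String) :
    (l.foldl (fun d x => d.insert x (d.getD x 0 + g x)) d).getD v 0
      = d.getD v 0 + (l.count v : Int) * g v := by
  induction l generalizing d with
  | nil => simp
  | cons x xs ih =>
    rw [List.foldl_cons, ih, PySem.Dict.getD_insert, List.count_cons]
    by_cases h : v = x
    · subst h; simp; ring
    · simp [h, Ne.symm h]

lemma aDict_getD (C_old data : List (List String)) (acc : PySem.Dict (List String) Int)
    (v : List String) :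
    (data.foldl
      (fun acc i =>
        C_old.foldl
          (fun acc2 itemset =>
            if PySem.Set.issubset (PySem.Set.ofList itemset) i then
              acc2.insert itemset (acc2.getD itemset 0 + 1)
            else acc2)
          acc)
      acc).getD v 0
      = acc.getD v 0 + (C_old.count v : Int) * (pvN data v : Int) := by
  induction data generalizing acc with
  | nil => simp [pvN]
  | cons t rest ih =>
    have hfil := PySem.List.foldl_if_eq_foldl_filter
      (fun (s : List String) => PySem.Set.issubset (PySem.Set.ofList s) t)
      (fun (a2 : PySem.Dict (List String) Int) (s : List String) =>
        a2.insert s (a2.getD s 0 + 1)) C_old acc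
    rw [List.foldl_cons, ih, hfil, PySem.Dict.getD_foldl_insert_add_one]
    have hN : pvN (t :: rest) v = pvN rest v + (if pvSub v t then 1 else 0) := by
      simp [pvN, List.countP_cons]
    by_cases h : pvSub v t
    · rw [List.count_filter (by simpa [pvSub] using h)]
      simp [hN, h]
      ring
    · have : (List.filter (fun s => PySem.Set.issubset (PySem.Set.ofList s) t) C_old).count v = 0 := by
        rw [List.count_eq_zero]
        intro hm
        exact h (by simpa [pvSub] using (List.mem_filter.mp hm).2)
      simp [this, hN, h]

lemma aDict_keys (C_old data : List (List String)) (acc : PySem.Dict (List String) Int) :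
    (data.foldl
      (fun acc i =>
        C_old.foldl
          (fun acc2 itemset =>
            if PySem.Set.issubset (PySem.Set.ofList itemset) i then
              acc2.insert itemset (acc2.getD itemset 0 + 1)
            else acc2)
          acc)
      acc).keys
      = PySem.Set.update acc.keys
          (data.flatMap (fun t => C_old.filter (fun s => pvSub s t))) := by
  induction data generalizing acc with
  | nil => simp [PySem.Set.update]
  | cons t rest ih =>
    have hfil := PySem.List.foldl_if_eq_foldl_filter
      (fun (s : List String) => PySem.Set.issubset (PySem.Set.ofList s) t)
      (fun (a2 : PySem.Dict (List String) Int) (s : List String) =>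
        a2.insert s (a2.getD s 0 + 1)) C_old acc
    rw [List.foldl_cons, ih, hfil, PySem.Dict.keys_foldl_insert]
    rw [List.flatMap_cons]
    show PySem.Set.update (PySem.Set.update acc.keys _) _ = _
    simp only [PySem.Set.update, List.foldl_append]
    rfl

-- ----- posting-side lemmas -----

lemma posting_inner (t : List String) (idx : Int) (d : PySem.Dict String (List Int))
    (item : String) :
    (t.foldl (fun d2 it => d2.modify it [] (fun s => PySem.Set.add s idx)) d).getD item []
      = if item ∈ t then PySem.Set.add (d.getD item []) idx else d.getD item [] := by
  induction t generalizing d with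
  | nil => simp
  | cons it rest ih =>
    rw [List.foldl_cons, ih, PySem.Dict.getD_modify]
    by_cases h : item = it
    · subst h
      by_cases hr : item ∈ rest
      · simp [hr]
      · simp [hr]
    · simp [h, List.mem_cons]

lemma enumerate_fst_ge (xs : List (List String)) (s : Int) :
    ∀ p ∈ PySem.List.enumerate xs s, s ≤ p.1 := by
  induction xs generalizing s with
  | nil => simp [PySem.List.enumerate]
  | cons x t ih =>
    intro p hp
    rw [PySem.List.enumerate_cons] at hp
    rcases List.mem_cons.mp hp with h | h
    · subst h; simp
    · have := ih (s + 1) p h; omega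

lemma enumerate_inc (xs : List (List String)) (s : Int) :
    (PySem.List.enumerate xs s).Pairwise (fun p q => p.1 < q.1) := by
  induction xs generalizing s with
  | nil => simp [PySem.List.enumerate]
  | cons x t ih =>
    rw [PySem.List.enumerate_cons]
    refine List.Pairwise.cons ?_ (ih (s + 1))
    intro q hq
    have := enumerate_fst_ge t (s + 1) q hq
    simp; omega

lemma mem_enumerate_iff (xs : List (List String)) (s : Int) (p : Int × List String) :
    p ∈ PySem.List.enumerate xs s
      ↔ ∃ k : Nat, k < xs.length ∧ p.1 = s + k ∧ xs[k]? = some p.2 := by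
  induction xs generalizing s with
  | nil => simp [PySem.List.enumerate]
  | cons x t ih =>
    rw [PySem.List.enumerate_cons]
    constructor
    · intro hp
      rcases List.mem_cons.mp hp with h | h
      · exact ⟨0, by simp, by simp [h], by simp [h]⟩
      · obtain ⟨k, hk, h1, h2⟩ := (ih (s + 1)).mp h
        exact ⟨k + 1, by simpa using hk, by push_cast at h1 ⊢; omega, by simpa using h2⟩
    · rintro ⟨k, hk, h1, h2⟩
      cases k with
      | zero =>
        simp at h2
        have hp : p = (s, x) := by
          obtain ⟨p1, p2⟩ := p
          simp at h1 h2 ⊢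
          exact ⟨by omega, h2.symm⟩
        rw [hp]
        exact List.mem_cons_self
      | succ k =>
        right
        refine (ih (s + 1)).mpr ⟨k, by simpa using hk, by push_cast at h1 ⊢; omega, by simpa using h2⟩

lemma posting_fold (l : List (Int × List String)) (d : PySem.Dict String (List Int))
    (item : String)
    (hfresh : ∀ p ∈ l, ∀ j ∈ d.getD item [], j < p.1)
    (hinc : l.Pairwise (fun p q => p.1 < q.1)) :
    (l.foldl
      (fun d p => p.2.foldl (fun d2 it => d2.modify it [] (fun s => PySem.Set.add s p.1)) d)
      d).getD item []
      = d.getD item [] ++ (l.filter (fun p => decide (item ∈ p.2))).map (·.1) := by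
  induction l generalizing d with
  | nil => simp
  | cons p l ih =>
    rw [List.foldl_cons]
    have hd' := posting_inner p.2 p.1 d item
    have hnotmem : p.1 ∉ d.getD item [] := fun hmem =>
      lt_irrefl _ (hfresh p (List.mem_cons_self) p.1 hmem)
    have hrest : ∀ q ∈ l, p.1 < q.1 := fun q hq => (List.pairwise_cons.mp hinc).1 q hq
    by_cases hmem : item ∈ p.2
    · rw [ih _ ?_ (List.pairwise_cons.mp hinc).2]
      · rw [hd']
        simp only [hmem, if_true, List.filter_cons, decide_eq_true_eq]
        rw [PySem.Set.add_of_not_mem hnotmem]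
        simp
      · intro q hq j hj
        rw [hd'] at hj
        rw [if_pos hmem] at hj
        rw [PySem.Set.add_of_not_mem hnotmem] at hj
        rcases List.mem_append.mp hj with h | h
        · exact lt_trans (hfresh p List.mem_cons_self j h) (hrest q hq)
        · simp at h; subst h; exact hrest q hq
    · rw [ih _ ?_ (List.pairwise_cons.mp hinc).2]
      · rw [hd']
        simp [hmem]
      · intro q hq j hj
        rw [hd'] at hj
        simp only [hmem, if_false] at hj
        exact hfresh q (List.mem_cons_of_mem _ hq) j (by simpa using hj)

lemma posting_getD (data : List (List String)) (item : String) :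
    (pvPosting data).getD item []
      = ((PySem.List.enumerate data).filter (fun p => decide (item ∈ p.2))).map (·.1) := by
  unfold pvPosting
  rw [posting_fold _ _ _ (by simp) (enumerate_inc data 0)]
  simp

lemma common_fold (posting : PySem.Dict String (List Int)) (rest : List String)
    (cs : List Int) :
    rest.foldl
      (fun c item =>
        let p := posting.getD item []
        match c with
        | none => some p
        | some cs => some (PySem.Set.inter cs p))
      (some cs)
      = some (cs.filter (fun j => rest.all (fun i2 => (posting.getD i2 []).contains j))) := by
  induction rest generalizing cs with
  | nil => simp
  | cons it rs ih =>
    rw [List.foldl_cons]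
    show rs.foldl _ (some (PySem.Set.inter cs (posting.getD it []))) = _
    rw [ih]
    congr 1
    show (List.filter _ (List.filter _ cs)) = _
    rw [List.filter_filter]
    apply List.filter_congr
    intro j _
    simp [List.all_cons, Bool.and_comm]

lemma common_cons (posting : PySem.Dict String (List Int)) (it : String) (rest : List String) :
    pvCommon posting (it :: rest)
      = some ((posting.getD it []).filter
          (fun j => rest.all (fun i2 => (posting.getD i2 []).contains j))) := by
  unfold pvCommon
  rw [List.foldl_cons]
  exact common_fold posting rest (posting.getD it [])

lemma enumerate_map_snd (xs : List (List String)) (s : Int) :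
    (PySem.List.enumerate xs s).map (·.2) = xs := by
  induction xs generalizing s with
  | nil => simp [PySem.List.enumerate]
  | cons x t ih => rw [PySem.List.enumerate_cons]; simp [ih]

lemma mem_posting_iff (data : List (List String)) (i2 : String) (pr : Int × List String)
    (hpr : pr ∈ PySem.List.enumerate data 0) :
    (pr.1 ∈ (pvPosting data).getD i2 []) ↔ i2 ∈ pr.2 := by
  rw [posting_getD]
  constructor
  · intro hj
    simp only [List.mem_map, List.mem_filter] at hj
    obtain ⟨pr', ⟨hpr', hq⟩, hfst⟩ := hj
    obtain ⟨k, hk, h1, h2⟩ := (mem_enumerate_iff data 0 pr').mp hpr'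
    obtain ⟨k0, hk0, h10, h20⟩ := (mem_enumerate_iff data 0 pr).mp hpr
    have : k = k0 := by omega
    subst this
    have : pr'.2 = pr.2 := by rw [h2] at h20; exact Option.some.inj h20
    rw [← this]
    simpa using hq
  · intro hmem
    simp only [List.mem_map, List.mem_filter]
    exact ⟨pr, ⟨hpr, by simpa using hmem⟩, rfl⟩

lemma cnt_eq (data : List (List String)) (s : List String) :
    pvCnt data s = (pvN data s : Int) := by
  cases s with
  | nil =>
    show (data.length : Int) = _
    simp [pvN, pvSub, PySem.Set.issubset, PySem.Set.ofList, List.countP_true]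
  | cons it rest =>
    show (match pvCommon (pvPosting data) (it :: rest) with
      | none => (data.length : Int)
      | some cs => (cs.length : Int)) = _
    rw [common_cons]
    show (((pvPosting data).getD it []).filter _).length = (pvN data (it :: rest) : Int)
    congr 1
    rw [posting_getD, List.filter_map, List.length_map, ← List.countP_eq_length_filter]
    have : pvN data (it :: rest)
        = (PySem.List.enumerate data 0).countP (fun pr => pvSub (it :: rest) pr.2) := by
      unfold pvN
      conv_lhs => rw [← enumerate_map_snd data 0]
      rw [List.countP_map]
      rfl
    rw [this, List.countP_filter]
    apply List.countP_congr
    intro pr hpr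
    have hmem : ∀ i2 : String, (pr.1 ∈ (pvPosting data).getD i2 []) ↔ i2 ∈ pr.2 :=
      fun i2 => mem_posting_iff data i2 pr hpr
    simp only [Function.comp_apply, Bool.and_eq_true, decide_eq_true_eq, pvSub_eq_all,
      List.all_cons, List.all_eq_true, List.contains_iff_mem]
    constructor
    · rintro ⟨hall, hit⟩
      exact ⟨hit, fun x hx => (hmem x).mp (hall x hx)⟩
    · rintro ⟨hit, hall⟩
      exact ⟨fun x hx => (hmem x).mpr (hall x hx), hit⟩

-- ----- the two dicts agree -----

lemma bDict_getD (data C_old : List (List String)) (v : List String) :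
    (pvDictB data C_old).getD v 0 = pvV data C_old v := by
  unfold pvDictB
  have hfil := PySem.List.foldl_ite_eq_foldl_filter
    (fun (s : List String) => pvCnt data s ≠ 0)
    (fun (acc : PySem.Dict (List String) Int) (s : List String) =>
      acc.insert s (acc.getD s 0 + pvCnt data s)) C_old PySem.Dict.empty
  rw [hfil, getD_foldl_insert_add _ (pvCnt data)]
  simp only [PySem.Dict.getD_empty, zero_add]
  by_cases h : pvCnt data v = 0
  · rw [pvV, cnt_eq] at *
    have : (pvN data v : Int) = 0 := h
    simp [this]
  · rw [List.count_filter (by simpa using h)]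
    rw [pvV, cnt_eq]

lemma aDict_getD' (data C_old : List (List String)) (v : List String) :
    (pvDictA data C_old).getD v 0 = pvV data C_old v := by
  unfold pvDictA
  rw [aDict_getD]
  simp [pvV]

lemma aDict_keys_mem (data C_old : List (List String)) (v : List String) :
    v ∈ (pvDictA data C_old).keys ↔ v ∈ C_old ∧ pvN data v ≠ 0 := by
  unfold pvDictA
  rw [aDict_keys]
  rw [PySem.Dict.keys_empty, PySem.Set.update_nil_left]
  rw [PySem.Set.mem_ofList, List.mem_flatMap]
  constructor
  · rintro ⟨t, ht, hv⟩
    have := List.mem_filter.mp hv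
    refine ⟨this.1, ?_⟩
    have : 0 < pvN data v := List.countP_pos_iff.mpr ⟨t, ht, this.2⟩
    omega
  · rintro ⟨hv, hN⟩
    have : 0 < pvN data v := Nat.pos_of_ne_zero hN
    obtain ⟨t, ht, hs⟩ := List.countP_pos_iff.mp this
    exact ⟨t, ht, List.mem_filter.mpr ⟨hv, hs⟩⟩

lemma bDict_keys_eq (data C_old : List (List String)) :
    (pvDictB data C_old).keys
      = PySem.Set.ofList (C_old.filter (fun s => decide (pvCnt data s ≠ 0))) := by
  unfold pvDictB
  have hfil := PySem.List.foldl_ite_eq_foldl_filter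
    (fun (s : List String) => pvCnt data s ≠ 0)
    (fun (acc : PySem.Dict (List String) Int) (s : List String) =>
      acc.insert s (acc.getD s 0 + pvCnt data s)) C_old PySem.Dict.empty
  rw [hfil, PySem.Dict.keys_foldl_insert]
  rw [PySem.Dict.keys_empty, PySem.Set.update_nil_left]

lemma bDict_keys_mem (data C_old : List (List String)) (v : List String) :
    v ∈ (pvDictB data C_old).keys ↔ v ∈ C_old ∧ pvN data v ≠ 0 := by
  rw [bDict_keys_eq, PySem.Set.mem_ofList, List.mem_filter]
  simp [cnt_eq]

lemma aDict_keys_nodup (data C_old : List (List String)) : (pvDictA data C_old).keys.Nodup := by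
  unfold pvDictA
  rw [aDict_keys, PySem.Dict.keys_empty, PySem.Set.update_nil_left]
  exact PySem.Set.nodup_ofList _

lemma bDict_keys_nodup (data C_old : List (List String)) : (pvDictB data C_old).keys.Nodup := by
  rw [bDict_keys_eq]
  exact PySem.Set.nodup_ofList _

lemma items_eq_map (data C_old : List (List String)) :
    (pvDictA data C_old).items
        = (pvDictA data C_old).keys.map (fun k => (k, pvV data C_old k))
    ∧ (pvDictB data C_old).items
        = (pvDictB data C_old).keys.map (fun k => (k, pvV data C_old k)) := by
  constructor
  · rw [PySem.Dict.items_eq_map_keys _ (aDict_keys_nodup data C_old) 0]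
    exact List.map_congr_left (fun k _ => by rw [aDict_getD'])
  · rw [PySem.Dict.items_eq_map_keys _ (bDict_keys_nodup data C_old) 0]
    exact List.map_congr_left (fun k _ => by rw [bDict_getD])

lemma items_perm (data C_old : List (List String)) :
    (pvDictA data C_old).items.Perm (pvDictB data C_old).items := by
  rw [(items_eq_map data C_old).1, (items_eq_map data C_old).2]
  apply List.Perm.map
  rw [List.perm_ext_iff_of_nodup (aDict_keys_nodup data C_old) (bDict_keys_nodup data C_old)]
  intro v
  rw [aDict_keys_mem, bDict_keys_mem]

-- ----- sorted2 with pairwise-distinct first keys is sort by the first key -----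

lemma insertBy_congr {α : Type} (f g : α → α → Bool) (x : α) (ys : List α)
    (h : ∀ y ∈ ys, f x y = g x y) :
    PySem.List.insertBy f x ys = PySem.List.insertBy g x ys := by
  induction ys with
  | nil => rfl
  | cons y ys ih =>
    simp only [PySem.List.insertBy]
    rw [h y List.mem_cons_self]
    by_cases hg : g x y = true
    · simp [hg]
    · simp only [Bool.not_eq_true] at hg
      simp [hg]
      exact ih (fun y hy => h y (List.mem_cons_of_mem _ hy))

lemma foldl_insertBy_congr {α : Type} (f g : α → α → Bool) (xs : List α)
    (hfg : ∀ a ∈ xs, ∀ b ∈ xs, f a b = g a b) :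
    ∀ (l acc : List α), (∀ a ∈ l, a ∈ xs) → (∀ a ∈ acc, a ∈ xs) →
      l.foldl (fun acc x => PySem.List.insertBy f x acc) acc
        = l.foldl (fun acc x => PySem.List.insertBy g x acc) acc := by
  intro l
  induction l with
  | nil => intro acc _ _; rfl
  | cons x t ih =>
    intro acc hl hacc
    rw [List.foldl_cons, List.foldl_cons]
    have hx : x ∈ xs := hl x List.mem_cons_self
    rw [insertBy_congr f g x acc (fun y hy => hfg x hx y (hacc y hy))]
    exact ih _ (fun a ha => hl a (List.mem_cons_of_mem _ ha))
      (fun a ha => (PySem.List.mem_insertBy g x a acc).mp ha |>.elim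
        (fun h => h ▸ hx) (fun h => hacc a h))

lemma sorted2_eq_sorted {α κ₁ κ₂ : Type} [lo₁ : LinearOrder κ₁] [lo₂ : LinearOrder κ₂]
    (xs : List α) (k1 : α → κ₁) (k2 : α → κ₂)
    (hkey : ∀ a ∈ xs, ∀ b ∈ xs, k1 a = k1 b → a = b) :
    @PySem.List.sorted2 α κ₁ κ₂ lo₁.toLT lo₁.toDecidableLT lo₂.toLT lo₂.toDecidableLT xs k1 k2 false
      = @PySem.List.sorted α κ₁ lo₁.toLT lo₁.toDecidableLT xs k1 false := by
  show xs.foldl (fun acc x => PySem.List.insertBy _ x acc) []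
      = xs.foldl (fun acc x => PySem.List.insertBy _ x acc) []
  apply foldl_insertBy_congr _ _ xs ?_ xs [] (fun a ha => ha) (by simp)
  intro a ha b hb
  by_cases hk : k1 a = k1 b
  · have hab : a = b := hkey a ha b hb hk
    subst hab
    simp
  · rcases lt_or_gt_of_ne hk with h | h
    · simp [h]
    · simp [h, not_lt_of_gt h]

lemma aItems_fst_inj (data C_old : List (List String)) :
    ∀ a ∈ (pvDictA data C_old).items, ∀ b ∈ (pvDictA data C_old).items, a.1 = b.1 → a = b := by
  intro a ha b hb hab
  rw [(items_eq_map data C_old).1] at ha hb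
  obtain ⟨ka, _, rfl⟩ := List.mem_map.mp ha
  obtain ⟨kb, _, rfl⟩ := List.mem_map.mp hb
  simp at hab; subst hab; rfl

lemma bItems_fst_inj (data C_old : List (List String)) :
    ∀ a ∈ (pvDictB data C_old).items, ∀ b ∈ (pvDictB data C_old).items, a.1 = b.1 → a = b := by
  intro a ha b hb hab
  rw [(items_eq_map data C_old).2] at ha hb
  obtain ⟨ka, _, rfl⟩ := List.mem_map.mp ha
  obtain ⟨kb, _, rfl⟩ := List.mem_map.mp hb
  simp at hab; subst hab; rfl

def pvSortFst (xs : List (List String × Int)) : List (List String × Int) :=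
  @PySem.List.sorted (List String × Int) (List String) pvOrd.toLT pvOrd.toDecidableLT
    xs (fun p => p.1) false

lemma pvSortItems_eq_sortFst (xs : List (List String × Int))
    (hkey : ∀ a ∈ xs, ∀ b ∈ xs, a.1 = b.1 → a = b) :
    pvSortItems xs = pvSortFst xs :=
  @sorted2_eq_sorted (List String × Int) (List String) Int pvOrd inferInstance
    xs (fun p => p.1) (fun p => p.2) hkey

lemma sorted_items_eq (data C_old : List (List String)) :
    pvSortFst (pvDictA data C_old).items = pvSortFst (pvDictB data C_old).items := by
  have hsp : (pvSortFst (pvDictB data C_old).items).Perm (pvDictB data C_old).items :=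
    @PySem.List.sorted_perm (List String × Int) (List String) pvOrd.toLT pvOrd.toDecidableLT
      (pvDictB data C_old).items (fun p => p.1) false
  have hys : (pvSortFst (pvDictB data C_old).items).Perm (pvDictA data C_old).items :=
    hsp.trans (items_perm data C_old).symm
  have hne_items : ((pvDictB data C_old).items).Pairwise (fun a b => a.1 ≠ b.1) := by
    rw [(items_eq_map data C_old).2, List.pairwise_map]
    exact List.Pairwise.imp (fun h => by simpa using h) (bDict_keys_nodup data C_old)
  have hne : (pvSortFst (pvDictB data C_old).items).Pairwise (fun a b => a.1 ≠ b.1) :=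
    (List.Perm.pairwise_iff (fun h => Ne.symm h) hsp).mpr hne_items
  have hle : (pvSortFst (pvDictB data C_old).items).Pairwise (fun a b => a.1 ≤ b.1) :=
    @PySem.List.sorted_pairwise (List String × Int) (List String) pvOrd
      (pvDictB data C_old).items (fun p => p.1)
  have hlt : (pvSortFst (pvDictB data C_old).items).Pairwise (fun a b => a.1 < b.1) :=
    (hle.and hne).imp (fun h => lt_of_le_of_ne h.1 h.2)
  exact @PySem.List.sorted_eq_of_perm_of_pairwise_lt (List String × Int) (List String) pvOrd
    (pvDictA data C_old).items (pvSortFst (pvDictB data C_old).items) (fun p => p.1) hys hlt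

theorem support_count_spec : Claim_equal_support_count := by
  intro data C_old _h
  show support_count data C_old = support_count_alt data C_old
  show pvSortItems (pvDictA data C_old).items = pvSortItems (pvDictB data C_old).items
  rw [pvSortItems_eq_sortFst _ (aItems_fst_inj data C_old),
      pvSortItems_eq_sortFst _ (bItems_fst_inj data C_old)]
  exact sorted_items_eq data C_old
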